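-- pv_equiv track=rewrite | github.com/tfagerlind/lingcite | src/lingcite/ut.py | grp2fd
-- ===== SOURCE A (Python) =====
-- def grp2fd(l):
--     r = {}
--     for (a, b) in l:
--         if a in r:
--             r[a][b] = r[a].get(b, 0) + 1
--         else:
--             r[a] = {b: 1}
--     return r
-- ===== SOURCE B (Python) =====
-- def grp2fd(l):
--     # collect-then-tally: group all second elements per first element,
--     # then turn each group into a frequency dict in first-appearance order
--     groups = {}
--     for a, b in l:
--         groups.setdefault(a, []).append(b)
--     return {a: {b: bs.count(b) for b in dict.fromkeys(bs)} for a, bs in groups.items()}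
-- ===== Notes on version B (the rewrite author's own statement) =====
-- stated objective: alternative
-- what changed: Replaces the single pass with a nested in-place counter update ('if a in r' branch) by two differently-shaped passes: first group every b under its a with setdefault/append, then build each inner frequency dict from the group list via dict.fromkeys order and list.count.
import Mathlib
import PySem

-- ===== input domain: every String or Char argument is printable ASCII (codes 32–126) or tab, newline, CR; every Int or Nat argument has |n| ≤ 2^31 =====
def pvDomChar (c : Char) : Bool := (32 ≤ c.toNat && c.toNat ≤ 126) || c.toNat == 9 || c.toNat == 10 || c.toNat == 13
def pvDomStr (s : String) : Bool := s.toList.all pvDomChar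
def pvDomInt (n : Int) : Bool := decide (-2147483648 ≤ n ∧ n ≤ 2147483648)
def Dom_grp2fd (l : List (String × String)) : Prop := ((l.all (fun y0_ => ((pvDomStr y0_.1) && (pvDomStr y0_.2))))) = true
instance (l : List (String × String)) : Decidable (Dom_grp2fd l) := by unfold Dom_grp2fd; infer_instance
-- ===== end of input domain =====

-- B replaces A's single pass with nested in-place counting by a collect-then-tally
-- two-pass decomposition (group the b's per a, then tally each group); alternative, not faster.


-- ===== PORT A =====
def grp2fdStepA (r : PySem.Dict String (PySem.Dict String Int)) (p : String × String) :
    PySem.Dict String (PySem.Dict String Int) :=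
  if r.contains p.1 then
    -- r[a][b] = r[a].get(b, 0) + 1
    let inner := r.getD p.1 PySem.Dict.empty
    r.insert p.1 (inner.insert p.2 (inner.getD p.2 0 + 1))
  else
    -- r[a] = {b: 1}
    r.insert p.1 (PySem.Dict.empty.insert p.2 1)

def grp2fd (l : List (String × String)) : List (String × List (String × Int)) :=
  ((l.foldl grp2fdStepA PySem.Dict.empty).items).map (fun p => (p.1, p.2.items))

-- ===== PORT B =====
def grp2fd_alt (l : List (String × String)) : List (String × List (String × Int)) :=
  -- pass 1: groups.setdefault(a, []).append(b)
  let groups := l.foldl (fun d p => d.modify p.1 [] (fun bs => bs ++ [p.2])) PySem.Dict.empty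
  -- pass 2: {a: {b: bs.count(b) for b in dict.fromkeys(bs)} for a, bs in groups.items()}
  (groups.items).map (fun p =>
    (p.1, (PySem.List.dedup p.2).map (fun b => (b, (PySem.List.count p.2 b : Int)))))

-- ===== PRECONDITION & SPEC =====
def Spec_grp2fd (l : List (String × String)) (out : List (String × List (String × Int))) : Prop := out = grp2fd_alt l
instance (l : List (String × String)) (out : List (String × List (String × Int))) : Decidable (Spec_grp2fd l out) := by unfold Spec_grp2fd; infer_instance

-- ===== CLAIM (what is proved, stated in full; the proofs are below) =====
def Claim_equal_grp2fd : Prop := ∀ (l : List (String × String)), Dom_grp2fd l → Spec_grp2fd l (grp2fd l)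

-- ===== LEMMAS AND PROOFS =====

-- the B-side grouping step
def grp2fdStepG (d : PySem.Dict String (List String)) (p : String × String) :
    PySem.Dict String (List String) :=
  d.modify p.1 [] (fun bs => bs ++ [p.2])

-- turn a dict of groups into A's dict of counters
def grp2fdMapD (d : PySem.Dict String (List String)) : PySem.Dict String (PySem.Dict String Int) :=
  PySem.Dict.mk (d.items.map (fun p => (p.1, PySem.Dict.counter p.2)))

theorem grp2fd_keys_mapD (d : PySem.Dict String (List String)) :
    (grp2fdMapD d).keys = d.keys := by
  simp [grp2fdMapD, PySem.Dict.keys]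

theorem grp2fd_contains_mapD (d : PySem.Dict String (List String)) (k : String) :
    (grp2fdMapD d).contains k = d.contains k := by
  rw [PySem.Dict.contains_eq_decide_mem_keys, PySem.Dict.contains_eq_decide_mem_keys,
    grp2fd_keys_mapD]

theorem grp2fd_step_comm (d : PySem.Dict String (List String)) (hnd : d.keys.Nodup)
    (p : String × String) :
    grp2fdStepA (grp2fdMapD d) p = grp2fdMapD (grp2fdStepG d p) := by
  by_cases hc : d.contains p.1 = true
  · -- key already present: in-place increment ↔ counter of appended group
    obtain ⟨bs, hbs⟩ : ∃ bs, d.get? p.1 = some bs := by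
      have := PySem.Dict.contains_eq_isSome_get? d p.1
      rw [hc] at this
      exact Option.isSome_iff_exists.mp this.symm
    have hmem : (p.1, bs) ∈ d.items := PySem.Dict.mem_items_of_get?_eq_some d hbs
    have hgd : d.getD p.1 [] = bs := PySem.Dict.getD_of_get?_eq_some d [] hbs
    have hmemM : (p.1, PySem.Dict.counter bs) ∈ (grp2fdMapD d).items := by
      simp only [grp2fdMapD]
      exact List.mem_map.mpr ⟨(p.1, bs), hmem, rfl⟩
    have hndM : (grp2fdMapD d).keys.Nodup := by rw [grp2fd_keys_mapD]; exact hnd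
    have hinner : (grp2fdMapD d).getD p.1 PySem.Dict.empty = PySem.Dict.counter bs :=
      PySem.Dict.getD_of_mem_items _ hmemM hndM _
    have hcM : (grp2fdMapD d).contains p.1 = true := by rw [grp2fd_contains_mapD]; exact hc
    simp only [grp2fdStepA, grp2fdStepG, hcM, if_pos, hinner]
    have hcnt : (PySem.Dict.counter bs).insert p.2 ((PySem.Dict.counter bs).getD p.2 0 + 1)
        = PySem.Dict.counter (bs ++ [p.2]) := by
      rw [PySem.Dict.counter_append_singleton]; rfl
    rw [hcnt]
    -- both sides replace the entry at p.1
    apply PySem.Dict.ext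
    rw [PySem.Dict.items_insert_of_contains _ _ hcM]
    simp only [grp2fdMapD, PySem.Dict.modify, PySem.Dict.items_insert_of_contains _ _ hc, hgd]
    rw [List.map_map, List.map_map]
    apply List.map_congr_left
    intro q _
    by_cases hq : q.1 = p.1 <;> simp [hq]
  · -- fresh key: {b: 1} ↔ counter [b]
    have hc' : d.contains p.1 = false := by simpa using hc
    have hcM : (grp2fdMapD d).contains p.1 = false := by rw [grp2fd_contains_mapD]; exact hc'
    have hgd : d.getD p.1 [] = [] := PySem.Dict.getD_of_not_contains d [] hc'
    simp only [grp2fdStepA, grp2fdStepG, hcM, Bool.false_eq_true, if_false]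
    apply PySem.Dict.ext
    rw [PySem.Dict.items_insert_of_not_contains _ _ hcM]
    simp only [grp2fdMapD, PySem.Dict.modify, hgd,
      PySem.Dict.items_insert_of_not_contains _ _ hc', List.map_append]
    congr 1

theorem grp2fd_fold_comm (l : List (String × String)) (d : PySem.Dict String (List String))
    (hnd : d.keys.Nodup) :
    l.foldl grp2fdStepA (grp2fdMapD d) = grp2fdMapD (l.foldl grp2fdStepG d) := by
  induction l generalizing d with
  | nil => rfl
  | cons p l ih =>
      simp only [List.foldl_cons, grp2fd_step_comm d hnd p]
      exact ih _ (by
        simpa [grp2fdStepG, PySem.Dict.modify] using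
          PySem.Dict.nodup_keys_insert d p.1 _ hnd)

-- ===== VERDICT (by name: the statement is the Claim_ definition above) =====
theorem grp2fd_spec : Claim_equal_grp2fd := by
  intro l _
  show grp2fd l = grp2fd_alt l
  unfold grp2fd grp2fd_alt
  have h0 : (PySem.Dict.empty : PySem.Dict String (PySem.Dict String Int))
      = grp2fdMapD PySem.Dict.empty := rfl
  rw [h0, grp2fd_fold_comm l PySem.Dict.empty (by simp [PySem.Dict.keys_empty])]
  show (grp2fdMapD _).items.map _ = _
  simp only [grp2fdMapD, List.map_map]
  apply List.map_congr_left
  intro q _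
  simp [PySem.Dict.items_counter, PySem.List.dedup, PySem.List.count]
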